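-- pv_equiv track=rewrite | github.com/zhangchuck/discord_quote_bot | src/bot/utils.py | block_format
-- ===== SOURCE A (Python) =====
-- def block_format(message):
--     """
--     Formats a given message as a Markdown block quote
--     """
--
--     # Find new line positions
--     insert_idx = [pos for pos, char in enumerate(message) if char == "\n"]
--     insert_idx.insert(0, -1)
--
--     # Insert "> " for block quote formatting
--     for offset, i in enumerate(insert_idx):
--
--         message = (message[:i + (2 * offset) + 1] +
--                   "> " +
--                   message[i + (2 * offset) + 1:])
--
--     return(message)
-- ===== SOURCE B (Python) =====
-- def block_format(message):
--     """
--     Formats a given message as a Markdown block quote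
--     """
--     return "> " + message.replace("\n", "\n> ")
-- ===== Notes on version B (the rewrite author's own statement) =====
-- stated objective: idiomatic
-- what changed: A collects newline indices and repeatedly re-slices the growing string with offset arithmetic (quadratic in the message length); B prefixes once and does a single replace of each newline with a newline plus the quote marker.
import Mathlib
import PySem

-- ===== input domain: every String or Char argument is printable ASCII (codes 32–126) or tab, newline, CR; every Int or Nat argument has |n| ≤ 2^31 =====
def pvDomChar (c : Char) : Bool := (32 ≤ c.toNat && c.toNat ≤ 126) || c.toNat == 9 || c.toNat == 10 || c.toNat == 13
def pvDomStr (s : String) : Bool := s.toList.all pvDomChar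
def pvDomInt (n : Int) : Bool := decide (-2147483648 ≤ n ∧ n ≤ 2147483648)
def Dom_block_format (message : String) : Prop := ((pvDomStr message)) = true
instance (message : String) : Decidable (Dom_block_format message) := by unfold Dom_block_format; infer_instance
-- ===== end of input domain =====

-- B replaces A's index-collecting, offset-arithmetic re-slicing loop with a single
-- prefix + str.replace("\n", "\n> "): idiomatic, one pass instead of repeated slicing.


-- ===== PORT A =====
-- the body of A's for-loop: message[:i+2*offset+1] + "> " + message[i+2*offset+1:]
-- (pair p = (i, offset): List.zipIdx pairs each element with its index)
def pvStepA (s : List Char) (p : Int × Nat) : List Char :=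
  PySem.List.slice s none (some (p.1 + 2 * (p.2 : Int) + 1)) ++ ('>' :: ' ' :: [])
    ++ PySem.List.slice s (some (p.1 + 2 * (p.2 : Int) + 1)) none

def block_format (message : String) : String :=
  let cs := message.toList
  -- insert_idx = [pos for pos, char in enumerate(message) if char == "\n"]; insert_idx.insert(0, -1)
  let insert_idx : List Int :=
    PySem.List.insert (((List.zipIdx cs).filter (fun pc => pc.1 == '\n')).map
      (fun pc => (pc.2 : Int))) 0 (-1)
  -- for offset, i in enumerate(insert_idx): message = message[:i+2*offset+1] + "> " + message[...:]
  String.ofList ((List.zipIdx insert_idx).foldl pvStepA cs)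

-- ===== PORT B =====
-- "> " + message.replace("\n", "\n> ")   (PySem.Chars.replace is Python's str.replace)
def block_format_alt (message : String) : String :=
  String.ofList ('>' :: ' ' :: PySem.Chars.replace message.toList ['\n'] ['\n', '>', ' '])

-- ===== PRECONDITION & SPEC =====
def Spec_block_format (message : String) (out : String) : Prop := out = block_format_alt message
instance (message : String) (out : String) : Decidable (Spec_block_format message out) := by unfold Spec_block_format; infer_instance

-- ===== CLAIM (what is proved, stated in full; the proofs are below) =====
def Claim_equal_block_format : Prop := ∀ (message : String), Dom_block_format message → Spec_block_format message (block_format message)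

-- ===== LEMMAS AND PROOFS =====

-- structural specification both sides are reduced to: "> " is re-inserted after every newline
def pvQuote : List Char → List Char
  | [] => []
  | c :: t => if c = '\n' then '\n' :: '>' :: ' ' :: pvQuote t else c :: pvQuote t

-- A's loop body once its insertion position is known to be the Nat n
def pvNatStep (s : List Char) (n : Nat) : List Char :=
  s.take n ++ '>' :: ' ' :: s.drop n

-- the successive insertion positions of A's loop (after the initial insertion at 0),
-- measured in the string "> " ++ cs as it grows
def pvTP : List Char → List Nat
  | [] => []
  | c :: t => if c = '\n' then 3 :: (pvTP t).map (· + 3) else (pvTP t).map (· + 1)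

-- the newline positions of cs
def pvNL : List Char → List Nat
  | [] => []
  | c :: t => if c = '\n' then 0 :: (pvNL t).map (· + 1) else (pvNL t).map (· + 1)

lemma pvQuote_nl (t : List Char) : pvQuote ('\n' :: t) = '\n' :: '>' :: ' ' :: pvQuote t := by
  simp [pvQuote]

lemma pvQuote_ne {c : Char} (t : List Char) (hc : c ≠ '\n') : pvQuote (c :: t) = c :: pvQuote t := by
  simp [pvQuote, hc]

lemma pvTP_nl (t : List Char) : pvTP ('\n' :: t) = 3 :: (pvTP t).map (· + 3) := by simp [pvTP]

lemma pvTP_ne {c : Char} (t : List Char) (hc : c ≠ '\n') : pvTP (c :: t) = (pvTP t).map (· + 1) := by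
  simp [pvTP, hc]

lemma pvNL_nl (t : List Char) : pvNL ('\n' :: t) = 0 :: (pvNL t).map (· + 1) := by simp [pvNL]

lemma pvNL_ne {c : Char} (t : List Char) (hc : c ≠ '\n') : pvNL (c :: t) = (pvNL t).map (· + 1) := by
  simp [pvNL, hc]

lemma pvNL_port (cs : List Char) : ∀ (n : Nat),
    ((List.zipIdx cs n).filter (fun pc => pc.1 == '\n')).map (fun pc => (pc.2 : Int))
      = (pvNL cs).map (fun k => ((k + n : Nat) : Int)) := by
  induction cs with
  | nil => intro n; simp [pvNL]
  | cons c t ih =>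
    intro n
    by_cases hc : c = '\n'
    · subst hc
      rw [pvNL_nl, List.zipIdx_cons]
      simp only [List.filter_cons, List.map_cons, List.map_map]
      norm_num [ih (n + 1)]
      intro a _
      omega
    · rw [pvNL_ne t hc, List.zipIdx_cons]
      simp only [List.filter_cons, List.map_map]
      have hbe : (c == '\n') = false := by simpa using hc
      simp only [hbe, Bool.false_eq_true, if_false]
      rw [ih (n + 1)]
      exact List.map_congr_left fun x _ => by
        simp only [Function.comp_apply]
        exact congrArg _ (by omega)

lemma pvStepA_eq_natStep (s : List Char) (i : Int) (o : Nat) (h : 0 ≤ i + 2 * o + 1) :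
    pvStepA s (i, o) = pvNatStep s (i + 2 * o + 1).toNat := by
  unfold pvStepA pvNatStep
  rw [PySem.List.slice_to s h, PySem.List.slice_from s h]
  simp

lemma pvShift (ps : List Nat) : ∀ (pre s : List Char),
    List.foldl pvNatStep (pre ++ s) (ps.map (· + pre.length)) = pre ++ List.foldl pvNatStep s ps := by
  induction ps with
  | nil => intro pre s; simp
  | cons n t ih =>
    intro pre s
    have hstep : pvNatStep (pre ++ s) (n + pre.length) = pre ++ pvNatStep s n := by
      unfold pvNatStep
      rw [List.take_append, List.drop_append]
      simp [List.take_of_length_le (by omega : pre.length ≤ n + pre.length)]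
    simp only [List.map_cons, List.foldl_cons, hstep, ih]

lemma pvMain (cs : List Char) : ∀ (a b : Char),
    List.foldl pvNatStep (a :: b :: cs) (pvTP cs) = a :: b :: pvQuote cs := by
  induction cs with
  | nil => intro a b; simp [pvTP, pvQuote]
  | cons c t ih =>
    intro a b
    by_cases hc : c = '\n'
    · subst hc
      rw [pvTP_nl, pvQuote_nl, List.foldl_cons]
      have h0 : pvNatStep (a :: b :: '\n' :: t) 3 = [a, b, '\n'] ++ ('>' :: ' ' :: t) := by
        simp [pvNatStep]
      rw [h0]
      have hsh := pvShift (pvTP t) [a, b, '\n'] ('>' :: ' ' :: t)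
      simp only [List.length_cons, List.length_nil] at hsh
      rw [show (0 : Nat) + 1 + 1 + 1 = 3 from rfl] at hsh
      rw [hsh, ih '>' ' ']
      simp
    · rw [pvTP_ne t hc, pvQuote_ne t hc]
      have hsh := pvShift (pvTP t) [a] (b :: c :: t)
      simp only [List.length_cons, List.length_nil, List.cons_append, List.nil_append] at hsh
      rw [show (0 : Nat) + 1 = 1 from rfl] at hsh
      rw [hsh, ih b c]

lemma pvGlue (cs : List Char) : ∀ (j o : Nat) (s : List Char),
    List.foldl pvStepA s (List.zipIdx ((pvNL cs).map (fun k => ((k + j : Nat) : Int))) (o + 1))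
      = List.foldl pvNatStep s ((pvTP cs).map (fun m => m + (j + 2 * o))) := by
  induction cs with
  | nil => intro j o s; simp [pvNL, pvTP]
  | cons c t ih =>
    intro j o s
    by_cases hc : c = '\n'
    · subst hc
      rw [pvNL_nl, pvTP_nl]
      rw [List.map_cons, List.zipIdx_cons, List.foldl_cons, List.map_cons, List.foldl_cons]
      have h1 : pvStepA s (((0 + j : Nat) : Int), o + 1) = pvNatStep s (3 + (j + 2 * o)) := by
        rw [pvStepA_eq_natStep s _ _ (by push_cast; omega)]
        congr 1
        omega
      rw [h1]
      have h2 : ((pvNL t).map (· + 1)).map (fun k => ((k + j : Nat) : Int))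
          = (pvNL t).map (fun k => ((k + (j + 1) : Nat) : Int)) := by
        rw [List.map_map]
        exact List.map_congr_left fun x _ => by
          simp only [Function.comp_apply]
          exact congrArg _ (by omega)
      have h3 : ((pvTP t).map (· + 3)).map (fun m => m + (j + 2 * o))
          = (pvTP t).map (fun m => m + ((j + 1) + 2 * (o + 1))) := by
        rw [List.map_map]
        exact List.map_congr_left fun x _ => by
          simp only [Function.comp_apply]
          omega
      rw [h2, h3]
      exact ih (j + 1) (o + 1) _
    · rw [pvNL_ne t hc, pvTP_ne t hc]
      have h2 : ((pvNL t).map (· + 1)).map (fun k => ((k + j : Nat) : Int))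
          = (pvNL t).map (fun k => ((k + (j + 1) : Nat) : Int)) := by
        rw [List.map_map]
        exact List.map_congr_left fun x _ => by
          simp only [Function.comp_apply]
          exact congrArg _ (by omega)
      have h3 : ((pvTP t).map (· + 1)).map (fun m => m + (j + 2 * o))
          = (pvTP t).map (fun m => m + ((j + 1) + 2 * o)) := by
        rw [List.map_map]
        exact List.map_congr_left fun x _ => by
          simp only [Function.comp_apply]
          omega
      rw [h2, h3]
      exact ih (j + 1) o _

-- str.replace with old = "\n", new = "\n> " computes pvQuote
lemma pvReplace_go (fuel : Nat) : ∀ (l acc : List Char), l.length ≤ fuel →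
    PySem.Chars.replace.go ['\n'] ['\n', '>', ' '] fuel l acc = acc.reverse ++ pvQuote l := by
  induction fuel with
  | zero =>
    intro l acc h
    have : l = [] := List.eq_nil_of_length_eq_zero (by omega)
    subst this
    simp [PySem.Chars.replace.go, pvQuote]
  | succ n ih =>
    intro l acc h
    cases l with
    | nil => simp [PySem.Chars.replace.go, pvQuote]
    | cons c t =>
      by_cases hc : c = '\n'
      · subst hc
        have hpre : List.isPrefixOf ['\n'] ('\n' :: t) = true := by
          simp [List.isPrefixOf]
        simp only [PySem.Chars.replace.go, hpre, if_pos]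
        rw [show List.drop (List.length ['\n']) ('\n' :: t) = t from rfl]
        rw [ih t (['\n', '>', ' '].reverse ++ acc) (by simpa using h)]
        rw [pvQuote_nl]
        simp
      · have hpre : List.isPrefixOf ['\n'] (c :: t) = false := by
          simp [List.isPrefixOf]
          exact fun h' => hc h'.symm
        simp only [PySem.Chars.replace.go, hpre, Bool.false_eq_true, if_false]
        rw [ih t (c :: acc) (by simpa using h), pvQuote_ne t hc]
        simp
lemma pvB_eq (cs : List Char) :
    PySem.Chars.replace cs ['\n'] ['\n', '>', ' '] = pvQuote cs := by
  unfold PySem.Chars.replace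
  simp only [List.isEmpty_cons, Bool.false_eq_true, if_false]
  simpa using pvReplace_go cs.length cs [] (le_refl _)

lemma pvA_eq (cs : List Char) :
    (List.zipIdx (PySem.List.insert
        (((List.zipIdx cs).filter (fun pc => pc.1 == '\n')).map (fun pc => (pc.2 : Int))) 0 (-1))).foldl
      pvStepA cs = '>' :: ' ' :: pvQuote cs := by
  rw [PySem.List.insert_zero, pvNL_port cs 0, List.zipIdx_cons, List.foldl_cons]
  have h0 : pvStepA cs ((-1 : Int), 0) = pvNatStep cs 0 := by
    rw [pvStepA_eq_natStep cs (-1) 0 (by norm_num)]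
    congr 1
  rw [h0, show pvNatStep cs 0 = '>' :: ' ' :: cs from by simp [pvNatStep]]
  rw [pvGlue cs 0 0 ('>' :: ' ' :: cs)]
  rw [show (pvTP cs).map (fun m => m + (0 + 2 * 0)) = pvTP cs from by simp]
  exact pvMain cs '>' ' '

-- ===== VERDICT (by name: the statement is the Claim_ definition above) =====
theorem block_format_spec : Claim_equal_block_format := by
  intro message _
  unfold Spec_block_format block_format block_format_alt
  rw [pvB_eq]
  exact congrArg String.ofList (pvA_eq message.toList)
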